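-- pv_equiv track=rewrite | github.com/torproject/stem | stem/response/__init__.py | _get_quote_indices
-- ===== SOURCE A (Python) =====
-- from typing import Any, Iterator, List, Optional, Sequence, Tuple, Union
--
-- def _get_quote_indices(line: str, escaped: bool) -> Tuple[int, int]:
--   """
--   Provides the indices of the next two quotes in the given content.
--
--   :param line: content to be parsed
--   :param escaped: unescapes the string
--
--   :returns: **tuple** of two ints, indices being -1 if a quote doesn't exist
--   """
--
--   indices, quote_index = [], -1
--
--   for _ in range(2):
--     quote_index = line.find('"', quote_index + 1)
--
--     # if we have escapes then we need to skip any r'\"' entries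
--     if escaped:
--       # skip check if index is -1 (no match) or 0 (first character)
--       while quote_index >= 1 and line[quote_index - 1] == '\\':
--         quote_index = line.find('"', quote_index + 1)
--
--     indices.append(quote_index)
--
--   return tuple(indices)  # type: ignore
-- ===== SOURCE B (Python) =====
-- def _get_quote_indices(line, escaped):
--   """Single pass: collect every unescaped-quote index, pad with -1, take the first two."""
--
--   hits = [i for i, ch in enumerate(line)
--           if ch == '"' and (not escaped or i == 0 or line[i - 1] != '\\')]
--   hits += [-1, -1]
--   return (hits[0], hits[1])
-- ===== Notes on version B (the rewrite author's own statement) =====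
-- stated objective: simpler
-- what changed: Replaces A's repeated str.find calls with a nested escape-skipping while loop by one comprehension pass that collects all unescaped-quote indices and takes the first two, padding with -1.
import Mathlib
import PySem

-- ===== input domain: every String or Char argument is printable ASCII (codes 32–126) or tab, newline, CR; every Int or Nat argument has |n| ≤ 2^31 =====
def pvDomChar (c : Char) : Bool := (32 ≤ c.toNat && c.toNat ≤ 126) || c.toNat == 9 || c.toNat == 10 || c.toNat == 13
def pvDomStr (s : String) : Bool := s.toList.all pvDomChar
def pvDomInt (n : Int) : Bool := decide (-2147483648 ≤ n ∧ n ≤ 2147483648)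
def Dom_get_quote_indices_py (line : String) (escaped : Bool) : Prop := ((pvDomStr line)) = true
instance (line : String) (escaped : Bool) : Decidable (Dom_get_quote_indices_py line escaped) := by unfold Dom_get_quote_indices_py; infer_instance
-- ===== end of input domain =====

-- B replaces A's repeated str.find calls and nested escape-skipping while loop by a single
-- scan collecting all unescaped-quote indices and taking the first two (objective: simpler).


-- ===== PORT A =====
-- A's inner 'while quote_index >= 1 and line[quote_index - 1] == '\\'' loop; the fuel
-- argument only makes the same computation total (the loop's find results strictly
-- increase, so cs.length steps always suffice).
def pvSkipEscA (cs : List Char) (fuel : Nat) (q : Int) : Int :=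
  match fuel with
  | 0 => q
  | fuel + 1 =>
    if 1 ≤ q ∧ PySem.List.pyGet? cs (q - 1) = some '\\' then
      pvSkipEscA cs fuel (PySem.Chars.findFrom cs ['"'] (q + 1) none)
    else q

def get_quote_indices_py (line : String) (escaped : Bool) : Int × Int :=
  let cs := line.toList
  let st := (List.range 2).foldl
    (fun (st : List Int × Int) _ =>
      let q := PySem.Chars.findFrom cs ['"'] (st.2 + 1) none
      let q := if escaped then pvSkipEscA cs cs.length q else q
      (st.1 ++ [q], q))
    ([], -1)
  match st.1 with
  | [a, b] => (a, b)
  | _ => (-1, -1)   -- unreachable: the loop appends exactly twice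

-- ===== PORT B =====
-- Source B: hits = [i for i, ch in enumerate(line) if ch == '"' and (not escaped or i == 0 or line[i-1] != '\\')]
--       hits += [-1, -1]; return (hits[0], hits[1])
-- line[i-1] is only evaluated with 1 <= i < len(line), so pyGetD is exact there;
-- hits[0]/hits[1] are always in range after the padding, so List.getD is exact.
def get_quote_indices_py_alt (line : String) (escaped : Bool) : Int × Int :=
  let cs := line.toList
  let hits : List Int :=
    ((PySem.List.enumerate cs 0).filter
        (fun p => p.2 == '"' && (!escaped || p.1 == 0 || !(PySem.List.pyGetD cs (p.1 - 1) ' ' == '\\')))).map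
      (fun p => p.1)
  let padded := hits ++ [-1, -1]
  (padded.getD 0 (-1), padded.getD 1 (-1))

-- ===== PRECONDITION & SPEC =====
def Spec_get_quote_indices_py (line : String) (escaped : Bool) (out : Int × Int) : Prop := out = get_quote_indices_py_alt line escaped
instance (line : String) (escaped : Bool) (out : Int × Int) : Decidable (Spec_get_quote_indices_py line escaped out) := by unfold Spec_get_quote_indices_py; infer_instance

-- ===== CLAIM (what is proved, stated in full; the proofs are below) =====
def Claim_equal_get_quote_indices_py : Prop := ∀ (line : String) (escaped : Bool), Dom_get_quote_indices_py line escaped → Spec_get_quote_indices_py line escaped (get_quote_indices_py line escaped)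

-- ===== LEMMAS AND PROOFS =====

-- i is a "good" (returnable) index: a quote, unescaped when escape mode is on
def pvGoodB (e : Bool) (cs : List Char) (i : Nat) : Bool :=
  cs.getD i ' ' == '"' && (!e || i == 0 || !(cs.getD (i - 1) ' ' == '\\'))

def pvGoodList (e : Bool) (cs : List Char) : List Nat :=
  (List.range cs.length).filter (pvGoodB e cs)

-- the first good index ≥ k, or -1
def pvNV (e : Bool) (cs : List Char) (k : Nat) : Int :=
  match (pvGoodList e cs).find? (fun i => decide (k ≤ i)) with
  | none => -1
  | some m => (m : Int)

theorem pvGetD_quote_iff {cs : List Char} {i : Nat} :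
    cs.getD i ' ' = '"' ↔ cs[i]? = some '"' := by
  rw [List.getD_eq_getElem?_getD]
  cases h : cs[i]? with
  | none => simp
  | some c => simp

theorem pvQuote_lt_length {cs : List Char} {i : Nat}
    (h : cs.getD i ' ' = '"') : i < cs.length := by
  obtain ⟨hlt, -⟩ := List.getElem?_eq_some_iff.mp (pvGetD_quote_iff.mp h)
  exact hlt

theorem pvGood_quote {e : Bool} {cs : List Char} {i : Nat}
    (h : pvGoodB e cs i = true) : cs.getD i ' ' = '"' := by
  simp [pvGoodB] at h
  exact h.1

theorem pvGood_false_of_no_quote {e : Bool} {cs : List Char} {i : Nat}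
    (h : cs.getD i ' ' ≠ '"') : pvGoodB e cs i = false := by
  cases hg : pvGoodB e cs i with
  | false => rfl
  | true => exact absurd (pvGood_quote hg) h

theorem pvGood_lt_length {e : Bool} {cs : List Char} {i : Nat}
    (h : pvGoodB e cs i = true) : i < cs.length :=
  pvQuote_lt_length (pvGood_quote h)

theorem pvMem_goodList {e : Bool} {cs : List Char} {m : Nat} :
    m ∈ pvGoodList e cs ↔ pvGoodB e cs m = true := by
  constructor
  · intro h
    exact (List.mem_filter.mp h).2
  · intro h
    exact List.mem_filter.mpr ⟨List.mem_range.mpr (pvGood_lt_length h), h⟩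

theorem pvGoodList_pairwise (e : Bool) (cs : List Char) :
    (pvGoodList e cs).Pairwise (· < ·) :=
  (List.pairwise_lt_range).filter _

theorem pvFind?_min {l : List Nat} (hp : l.Pairwise (· < ·)) {k m' : Nat}
    (h : l.find? (fun i => decide (k ≤ i)) = some m') :
    ∀ x ∈ l, k ≤ x → m' ≤ x := by
  induction l with
  | nil => simp at h
  | cons a t ih =>
    by_cases hka : k ≤ a
    · rw [List.find?_cons_of_pos (by simpa using hka)] at h
      have hm' : m' = a := by simpa using h.symm
      intro x hx hkx
      rcases List.mem_cons.mp hx with rfl | hxt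
      · omega
      · have := (List.pairwise_cons.mp hp).1 x hxt
        omega
    · rw [List.find?_cons_of_neg (by simpa using hka)] at h
      intro x hx hkx
      rcases List.mem_cons.mp hx with rfl | hxt
      · omega
      · exact ih (List.pairwise_cons.mp hp).2 h x hxt hkx

theorem pvNV_eq_neg {e : Bool} {cs : List Char} {k : Nat}
    (h : ∀ i, k ≤ i → pvGoodB e cs i = false) : pvNV e cs k = -1 := by
  have hn : (pvGoodList e cs).find? (fun i => decide (k ≤ i)) = none := by
    rw [List.find?_eq_none]
    intro x hx hd
    have hg := pvMem_goodList.mp hx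
    have := h x (by simpa using hd)
    simp [this] at hg
  simp [pvNV, hn]

theorem pvNV_eq {e : Bool} {cs : List Char} {k m : Nat}
    (hm : pvGoodB e cs m = true) (hk : k ≤ m)
    (hlt : ∀ i, k ≤ i → i < m → pvGoodB e cs i = false) : pvNV e cs k = (m : Int) := by
  have hmem : m ∈ pvGoodList e cs := pvMem_goodList.mpr hm
  cases hfind : (pvGoodList e cs).find? (fun i => decide (k ≤ i)) with
  | none =>
    exact absurd (List.find?_eq_none.mp hfind m hmem (by simpa using hk)) (by simp)
  | some m' =>
    have hm'mem : m' ∈ pvGoodList e cs := List.mem_of_find?_eq_some hfind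
    have hkm' : k ≤ m' := by simpa using List.find?_some hfind
    have hm'good : pvGoodB e cs m' = true := pvMem_goodList.mp hm'mem
    have h1 : ¬ m' < m := fun hc => by simp [hlt m' hkm' hc] at hm'good
    have h2 : m' ≤ m := pvFind?_min (pvGoodList_pairwise e cs) hfind m hmem hk
    have : m' = m := by omega
    simp [pvNV, hfind, this]

theorem pvQuote_prefix_drop {cs : List Char} {j : Nat} :
    ['"'] <+: cs.drop j ↔ cs.getD j ' ' = '"' := by
  rw [pvGetD_quote_iff, ← List.head?_drop]
  cases hd : cs.drop j with
  | nil => simp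
  | cons a t => simp [List.cons_prefix_cons, eq_comm]

-- characterisation of Python's line.find('"', k) for 0 ≤ k ≤ len(line)
theorem pvFindQ_cases (cs : List Char) (k : Nat) (hk : k ≤ cs.length) :
    (PySem.Chars.findFrom cs ['"'] (k : Int) none = -1 ∧ ∀ i, k ≤ i → cs.getD i ' ' ≠ '"') ∨
    (∃ m : Nat, PySem.Chars.findFrom cs ['"'] (k : Int) none = (m : Int) ∧ k ≤ m ∧ m < cs.length ∧
      cs.getD m ' ' = '"' ∧ ∀ i, k ≤ i → i < m → cs.getD i ' ' ≠ '"') := by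
  by_cases h : PySem.Chars.findFrom cs ['"'] (k : Int) none = -1
  · left
    refine ⟨h, ?_⟩
    have hni : ¬ ['"'] <:+: cs.drop k :=
      (PySem.Chars.findFrom_natCast_eq_neg_one_iff cs ['"'] k hk).mp h
    rw [List.singleton_infix_iff] at hni
    intro i hi hq
    apply hni
    have hiq := pvGetD_quote_iff.mp hq
    have : (cs.drop k)[i - k]? = some '"' := by
      rw [List.getElem?_drop]
      rwa [show k + (i - k) = i by omega]
    exact List.mem_of_getElem? this
  · right
    obtain ⟨hle, hpre, hmin⟩ := PySem.Chars.findFrom_natCast_spec cs ['"'] k hk h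
    set r := PySem.Chars.findFrom cs ['"'] (k : Int) none with hr
    have hr0 : (0 : Int) ≤ r := le_trans (by exact_mod_cast Nat.zero_le k) hle
    refine ⟨r.toNat, (Int.toNat_of_nonneg hr0).symm, ?_, ?_, ?_, ?_⟩
    · omega
    · exact pvQuote_lt_length (pvQuote_prefix_drop.mp hpre)
    · exact pvQuote_prefix_drop.mp hpre
    · intro i h1 h2 hq
      exact hmin i h1 h2 (pvQuote_prefix_drop.mpr hq)

theorem pvSkip_neg (cs : List Char) (fuel : Nat) {q : Int} (h : q ≤ 0) :
    pvSkipEscA cs fuel q = q := by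
  cases fuel with
  | zero => rfl
  | succ n =>
    rw [pvSkipEscA, if_neg]
    rintro ⟨h1, -⟩
    omega

theorem pvSkip_main (cs : List Char) :
    ∀ fuel m k, cs.length - m ≤ fuel → k ≤ m → cs.getD m ' ' = '"' →
      (∀ i, k ≤ i → i < m → pvGoodB true cs i = false) →
      pvSkipEscA cs fuel (m : Int) = pvNV true cs k := by
  intro fuel
  induction fuel with
  | zero =>
    intro m k hfuel hk hq _
    have := pvQuote_lt_length hq
    omega
  | succ n ih =>
    intro m k hfuel hk hq hmin
    have hmlt : m < cs.length := pvQuote_lt_length hq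
    rw [pvSkipEscA]
    by_cases hC : 1 ≤ (m : Int) ∧ PySem.List.pyGet? cs ((m : Int) - 1) = some '\\'
    · rw [if_pos hC]
      have hm1 : 1 ≤ m := by exact_mod_cast hC.1
      have hprev : cs.getD (m - 1) ' ' = '\\' := by
        have hg := hC.2
        rw [show (m : Int) - 1 = ((m - 1 : Nat) : Int) by omega] at hg
        rw [PySem.List.pyGet?_natCast] at hg
        rw [List.getD_eq_getElem?_getD, hg]
        rfl
      have hgm : pvGoodB true cs m = false := by
        have hm0 : m ≠ 0 := by omega
        rw [List.getD_eq_getElem?_getD] at hprev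
        simp [pvGoodB, hprev, hm0]
      rw [show (m : Int) + 1 = ((m + 1 : Nat) : Int) by push_cast; ring]
      rcases pvFindQ_cases cs (m + 1) (by omega) with ⟨hf, hno⟩ | ⟨m', hf, hkm', hm'lt, hq', hmin'⟩
      · rw [hf, pvSkip_neg cs n (by norm_num)]
        refine (pvNV_eq_neg fun i hi => ?_).symm
        rcases lt_trichotomy i m with h | rfl | h
        · exact hmin i hi h
        · exact hgm
        · exact pvGood_false_of_no_quote (hno i (by omega))
      · rw [hf]
        refine ih m' k (by omega) (by omega) hq' fun i h1 h2 => ?_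
        rcases lt_trichotomy i m with h | rfl | h
        · exact hmin i h1 h
        · exact hgm
        · exact pvGood_false_of_no_quote (hmin' i (by omega) h2)
    · rw [if_neg hC]
      have hgm : pvGoodB true cs m = true := by
        rcases Nat.eq_zero_or_pos m with h0 | hpos
        · subst h0
          rw [List.getD_eq_getElem?_getD] at hq
          simp [pvGoodB, hq]
        · have hnp : ¬ PySem.List.pyGet? cs ((m : Int) - 1) = some '\\' :=
            fun hc => hC ⟨by exact_mod_cast hpos, hc⟩
          rw [show (m : Int) - 1 = ((m - 1 : Nat) : Int) by omega] at hnp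
          rw [PySem.List.pyGet?_natCast] at hnp
          have hprev : ¬ cs.getD (m - 1) ' ' = '\\' := by
            rw [List.getD_eq_getElem?_getD]
            rw [List.getElem?_eq_getElem (by omega : m - 1 < cs.length)] at hnp ⊢
            simpa using hnp
          rw [List.getD_eq_getElem?_getD] at hq hprev
          simp [pvGoodB, hq, hprev]
      exact (pvNV_eq hgm hk hmin).symm

-- one iteration of A's outer loop computes the first good index ≥ k
theorem pvStep (e : Bool) (cs : List Char) (k : Nat) (hk : k ≤ cs.length) :
    (if e then pvSkipEscA cs cs.length (PySem.Chars.findFrom cs ['"'] (k : Int) none)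
     else PySem.Chars.findFrom cs ['"'] (k : Int) none) = pvNV e cs k := by
  rcases pvFindQ_cases cs k hk with ⟨hf, hno⟩ | ⟨m, hf, hkm, hmlt, hq, hmin⟩
  · rw [hf]
    have hnv : pvNV e cs k = -1 :=
      pvNV_eq_neg fun i hi => pvGood_false_of_no_quote (hno i hi)
    cases e with
    | false => simpa using hnv.symm
    | true => rw [pvSkip_neg cs cs.length (by norm_num)]; simpa using hnv.symm
  · rw [hf]
    cases e with
    | false =>
      simp only [if_neg Bool.false_ne_true]
      refine (pvNV_eq ?_ hkm fun i h1 h2 => pvGood_false_of_no_quote (hmin i h1 h2)).symm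
      rw [List.getD_eq_getElem?_getD] at hq
      simp [pvGoodB, hq]
    | true =>
      exact pvSkip_main cs cs.length m k (by omega) hkm hq
        fun i h1 h2 => pvGood_false_of_no_quote (hmin i h1 h2)

-- B's comprehension builds exactly the good indices (as Ints)
theorem pvAlt_hits (e : Bool) (cs : List Char) :
    ((PySem.List.enumerate cs 0).filter
        (fun p => p.2 == '"' && (!e || p.1 == 0 || !(PySem.List.pyGetD cs (p.1 - 1) ' ' == '\\')))).map
      (fun p => p.1)
      = (pvGoodList e cs).map (fun (i : Nat) => (i : Int)) := by
  rw [PySem.List.enumerate_eq_map_pyRange (d := ' ')]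
  have hr : PySem.List.pyRange 0 (PySem.List.len cs) 1
      = (List.range cs.length).map (fun (i : Nat) => (i : Int)) := by
    rw [show PySem.List.len cs = (cs.length : Int) from rfl, PySem.List.pyRange_one]
    simp
  rw [hr, List.map_map, List.filter_map, List.map_map]
  have hfil : (List.range cs.length).filter
      ((fun p => p.2 == '"' && (!e || p.1 == 0 || !(PySem.List.pyGetD cs (p.1 - 1) ' ' == '\\'))) ∘
        ((fun j => (j, PySem.List.pyGetD cs j ' ')) ∘ (fun (i : Nat) => (i : Int))))
      = pvGoodList e cs := by
    unfold pvGoodList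
    apply List.filter_congr
    intro i _
    simp only [Function.comp]
    rw [PySem.List.pyGetD_natCast]
    cases i with
    | zero => simp [pvGoodB]
    | succ j =>
      rw [show ((j + 1 : Nat) : Int) - 1 = ((j : Nat) : Int) by push_cast; ring,
        PySem.List.pyGetD_natCast]
      have h10 : ((j : Int) + 1 ≠ 0) := by omega
      have h11 : (((j : Int) + 1) == 0) = false := by simpa using h10
      simp [pvGoodB, h11]
  rw [hfil]
  apply List.map_congr_left
  intro a _
  rfl

-- ===== VERDICT (by name: the statement is the Claim_ definition above) =====
theorem get_quote_indices_py_spec : Claim_equal_get_quote_indices_py := by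
  unfold Claim_equal_get_quote_indices_py
  intro line e _
  unfold Spec_get_quote_indices_py
  set cs := line.toList with hcs
  set F : Int → Int := fun s =>
    if e then pvSkipEscA cs cs.length (PySem.Chars.findFrom cs ['"'] (s + 1) none)
    else PySem.Chars.findFrom cs ['"'] (s + 1) none with hF
  have hA : get_quote_indices_py line e = (F (-1), F (F (-1))) := rfl
  have hB : get_quote_indices_py_alt line e =
      (((pvGoodList e cs).map (fun (i : Nat) => (i : Int)) ++ [-1, -1]).getD 0 (-1),
       ((pvGoodList e cs).map (fun (i : Nat) => (i : Int)) ++ [-1, -1]).getD 1 (-1)) := by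
    rw [← pvAlt_hits e cs]
    rfl
  have hFk : ∀ k : Nat, k ≤ cs.length → F ((k : Int) - 1) = pvNV e cs k := by
    intro k hk
    rw [hF]
    simp only
    rw [show (k : Int) - 1 + 1 = (k : Int) by ring]
    exact pvStep e cs k hk
  have hF0 : F (-1) = pvNV e cs 0 := by
    rw [show (-1 : Int) = ((0 : Nat) : Int) - 1 by norm_num]
    exact hFk 0 (Nat.zero_le _)
  rw [hA, hB]
  cases hgl : pvGoodList e cs with
  | nil =>
    have hnv0 : pvNV e cs 0 = -1 := by simp [pvNV, hgl]
    rw [hF0, hnv0, hF0, hnv0]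
    simp
  | cons g0 rest =>
    have hg0mem : g0 ∈ pvGoodList e cs := by rw [hgl]; exact List.mem_cons_self
    have hg0lt : g0 < cs.length := pvGood_lt_length (pvMem_goodList.mp hg0mem)
    have hnv0 : pvNV e cs 0 = (g0 : Int) := by
      simp [pvNV, hgl, List.find?_cons_of_pos]
    have hpw := pvGoodList_pairwise e cs
    rw [hgl] at hpw
    have hrest : ∀ x ∈ rest, g0 < x := (List.pairwise_cons.mp hpw).1
    have hfind : (pvGoodList e cs).find? (fun i => decide (g0 + 1 ≤ i)) =
        rest.find? (fun i => decide (g0 + 1 ≤ i)) := by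
      rw [hgl, List.find?_cons_of_neg (by simp)]
    have hq2 : F ((g0 : Int)) = pvNV e cs (g0 + 1) := by
      rw [show ((g0 : Nat) : Int) = ((g0 + 1 : Nat) : Int) - 1 by push_cast; ring]
      exact hFk (g0 + 1) (by omega)
    rw [hF0, hnv0, hq2]
    cases rest with
    | nil =>
      have hnv1 : pvNV e cs (g0 + 1) = -1 := by
        unfold pvNV
        rw [hfind]
        rfl
      rw [hnv1]
      simp
    | cons r0 t =>
      have h1 : g0 + 1 ≤ r0 := hrest r0 List.mem_cons_self
      have hnv1 : pvNV e cs (g0 + 1) = (r0 : Int) := by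
        unfold pvNV
        rw [hfind, List.find?_cons_of_pos (by simp; omega)]
      rw [hnv1]
      simp
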